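-- pv_equiv track=rewrite | github.com/HuayuChen2004/NumberWeave | solution.py | check_map_fill
-- ===== SOURCE A (Python) =====
-- def check_map_fill(size, row_counts, column_counts, map):
--     for i in range(len(map)):
--         if not check_row_fill(size, row_counts[i], map[i]):
--             return False
--     for i in range(size):
--         if not check_column_fill(size, column_counts[i], [row[i] for row in map]):
--             return False
--     return True
--
-- def check_row_fill(size, row_count, row):
--     current_row_count = []
--     count = 0
--     for i in range(size):
--         if row[i] == 1:
--             count += 1
--         elif count:
--             current_row_count.append(count)
--             count = 0
--     if count:
--         current_row_count.append(count)
--     return current_row_count == row_count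
--
-- def check_column_fill(size, column_count, column):
--     current_column_count = []
--     count = 0
--     for i in range(size):
--         if column[i] == 1:
--             count += 1
--         elif count:
--             current_column_count.append(count)
--             count = 0
--     if count:
--         current_column_count.append(count)
--     return current_column_count == column_count
-- ===== SOURCE B (Python) =====
-- def check_map_fill(size, row_counts, column_counts, map):
--     def runs(line):
--         vals = [line[i] for i in range(size)]
--         out = []
--         j, n = 0, len(vals)
--         while j < n:
--             k = j
--             while k < n and (vals[k] == 1) == (vals[j] == 1):
--                 k += 1
--             if vals[j] == 1:
--                 out.append(k - j)
--             j = k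
--         return out
--     for i in range(len(map)):
--         if runs(map[i]) != row_counts[i]:
--             return False
--     for i in range(size):
--         if runs([row[i] for row in map]) != column_counts[i]:
--             return False
--     return True
-- ===== Notes on version B (the rewrite author's own statement) =====
-- stated objective: alternative
-- what changed: Replaces the three stateful count-and-flush loops with one run-length helper that groups each line by a two-pointer span decomposition and compares the measured group lengths, used uniformly for rows and columns.
-- outside the precondition, e.g. on check_map_fill(1, [[1]], [], [[0]]): A returns False, B returns False
import Mathlib
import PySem

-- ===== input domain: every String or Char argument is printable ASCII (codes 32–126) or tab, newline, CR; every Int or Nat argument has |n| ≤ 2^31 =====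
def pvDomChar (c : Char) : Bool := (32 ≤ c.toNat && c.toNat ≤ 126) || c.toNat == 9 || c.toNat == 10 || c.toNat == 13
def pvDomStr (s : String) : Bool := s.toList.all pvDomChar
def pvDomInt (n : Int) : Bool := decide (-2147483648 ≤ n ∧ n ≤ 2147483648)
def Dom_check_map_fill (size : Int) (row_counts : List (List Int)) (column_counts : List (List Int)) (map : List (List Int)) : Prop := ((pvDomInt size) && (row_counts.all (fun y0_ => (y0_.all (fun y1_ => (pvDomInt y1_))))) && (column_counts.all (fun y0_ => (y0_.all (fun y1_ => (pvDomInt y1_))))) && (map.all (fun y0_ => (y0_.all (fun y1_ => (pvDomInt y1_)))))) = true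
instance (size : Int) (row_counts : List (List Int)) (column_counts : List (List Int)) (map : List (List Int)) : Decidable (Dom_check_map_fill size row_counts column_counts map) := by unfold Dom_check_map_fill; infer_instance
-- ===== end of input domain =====

-- B replaces A's three stateful count-and-flush loops with one run-length helper that groups each
-- line by a span (two-pointer) decomposition; alternative structure, same cost.


-- ===== PORT A =====
def check_row_fill (size : Int) (row_count : List Int) (row : List Int) : Bool :=
  let res := (PySem.List.pyRange 0 size 1).foldl
    (fun (s : List Int × Int) i =>
      if PySem.List.pyGetD row i 0 == 1 then (s.1, s.2 + 1)
      else if s.2 ≠ 0 then (s.1 ++ [s.2], (0 : Int)) else s) ([], 0)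
  let cur := if res.2 ≠ 0 then res.1 ++ [res.2] else res.1
  cur == row_count

def check_column_fill (size : Int) (column_count : List Int) (column : List Int) : Bool :=
  let res := (PySem.List.pyRange 0 size 1).foldl
    (fun (s : List Int × Int) i =>
      if PySem.List.pyGetD column i 0 == 1 then (s.1, s.2 + 1)
      else if s.2 ≠ 0 then (s.1 ++ [s.2], (0 : Int)) else s) ([], 0)
  let cur := if res.2 ≠ 0 then res.1 ++ [res.2] else res.1
  cur == column_count

def check_map_fill (size : Int) (row_counts : List (List Int)) (column_counts : List (List Int)) (map : List (List Int)) : Bool :=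
  ((PySem.List.pyRange 0 (map.length : Int) 1).all (fun i =>
      check_row_fill size (PySem.List.pyGetD row_counts i []) (PySem.List.pyGetD map i [])))
  && ((PySem.List.pyRange 0 size 1).all (fun i =>
      check_column_fill size (PySem.List.pyGetD column_counts i []) (map.map (fun row => PySem.List.pyGetD row i 0))))

-- ===== PORT B =====
-- run-lengths of the maximal groups of equal "== 1"-ness, keeping only the 1-groups
-- (the inner while loop of Source B is the takeWhile/dropWhile span of the current group)
def runsB : List Int → List Int
  | [] => []
  | x :: t =>
    if x == 1
    then ((((x :: t).takeWhile (fun y => (y == 1) == (x == 1))).length : Int))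
           :: runsB (t.dropWhile (fun y => (y == 1) == (x == 1)))
    else runsB (t.dropWhile (fun y => (y == 1) == (x == 1)))
termination_by l => l.length
decreasing_by all_goals exact Nat.lt_succ_of_le (List.length_dropWhile_le _ _)

def lineVals (size : Int) (line : List Int) : List Int :=
  (PySem.List.pyRange 0 size 1).map (fun i => PySem.List.pyGetD line i 0)

def check_line_alt (size : Int) (expected : List Int) (line : List Int) : Bool :=
  runsB (lineVals size line) == expected

def check_map_fill_alt (size : Int) (row_counts : List (List Int)) (column_counts : List (List Int)) (map : List (List Int)) : Bool :=
  ((PySem.List.pyRange 0 (map.length : Int) 1).all (fun i =>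
      check_line_alt size (PySem.List.pyGetD row_counts i []) (PySem.List.pyGetD map i [])))
  && ((PySem.List.pyRange 0 size 1).all (fun i =>
      check_line_alt size (PySem.List.pyGetD column_counts i []) (map.map (fun row => PySem.List.pyGetD row i 0))))

-- ===== PRECONDITION & SPEC =====
-- Pre_ excludes the ragged inputs on which Python A can raise IndexError — a row shorter than
-- size, row_counts shorter than map, or (when size > 0) column_counts or map shorter than size —
-- including the few such shapes where A happens to return False early before reaching the bad index.
def Pre_check_map_fill (size : Int) (row_counts : List (List Int)) (column_counts : List (List Int)) (map : List (List Int)) : Prop :=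
  map.length ≤ row_counts.length ∧
  (∀ r ∈ map, size ≤ (r.length : Int)) ∧
  (0 < size → size ≤ (column_counts.length : Int) ∧ size ≤ (map.length : Int))
instance (size : Int) (row_counts : List (List Int)) (column_counts : List (List Int)) (map : List (List Int)) : Decidable (Pre_check_map_fill size row_counts column_counts map) := by unfold Pre_check_map_fill; infer_instance

def pvWitness_check_map_fill : Int × List (List Int) × List (List Int) × List (List Int) :=
  (2, [[1], [2]], [[2], [1]], [[1, 0], [1, 1]])

def Spec_check_map_fill (size : Int) (row_counts : List (List Int)) (column_counts : List (List Int)) (map : List (List Int)) (out : Bool) : Prop := out = check_map_fill_alt size row_counts column_counts map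
instance (size : Int) (row_counts : List (List Int)) (column_counts : List (List Int)) (map : List (List Int)) (out : Bool) : Decidable (Spec_check_map_fill size row_counts column_counts map out) := by unfold Spec_check_map_fill; infer_instance

-- ===== CLAIM (what is proved, stated in full; the proofs are below) =====
def Claim_equal_check_map_fill : Prop := ∀ (size : Int) (row_counts : List (List Int)) (column_counts : List (List Int)) (map : List (List Int)), Dom_check_map_fill size row_counts column_counts map → Pre_check_map_fill size row_counts column_counts map → Spec_check_map_fill size row_counts column_counts map (check_map_fill size row_counts column_counts map)

-- ===== LEMMAS AND PROOFS =====

-- A's loop body as a function of the element read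
def stepElem (s : List Int × Int) (x : Int) : List Int × Int :=
  if x == 1 then (s.1, s.2 + 1) else if s.2 ≠ 0 then (s.1 ++ [s.2], (0 : Int)) else s

-- A's count-and-flush result described structurally
def gruns (c : Int) : List Int → List Int
  | [] => if c ≠ 0 then [c] else []
  | x :: xs => if x == 1 then gruns (c + 1) xs else if c ≠ 0 then c :: gruns 0 xs else gruns 0 xs

theorem fold_gruns {ι : Type} (l : List ι) (f : ι → Int) :
    ∀ (acc : List Int) (c : Int),
    (if (l.foldl (fun s i => stepElem s (f i)) (acc, c)).2 ≠ 0
       then (l.foldl (fun s i => stepElem s (f i)) (acc, c)).1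
              ++ [(l.foldl (fun s i => stepElem s (f i)) (acc, c)).2]
       else (l.foldl (fun s i => stepElem s (f i)) (acc, c)).1)
      = acc ++ gruns c (l.map f) := by
  induction l with
  | nil =>
    intro acc c
    simp only [List.foldl_nil, List.map_nil, gruns]
    split_ifs <;> simp
  | cons i l ih =>
    intro acc c
    simp only [List.foldl_cons, List.map_cons]
    by_cases h : f i == 1
    · rw [show stepElem (acc, c) (f i) = (acc, c + 1) from by simp [stepElem, h]]
      rw [ih acc (c + 1)]
      simp [gruns, h]
    · by_cases hc : c ≠ 0
      · rw [show stepElem (acc, c) (f i) = (acc ++ [c], 0) from by simp [stepElem, h, hc]]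
        rw [ih (acc ++ [c]) 0]
        simp [gruns, h, hc]
      · rw [show stepElem (acc, c) (f i) = (acc, c) from by simp [stepElem, h, hc]]
        rw [ih acc c]
        simp at hc
        simp [gruns, h, hc]

theorem dropWhile_head_false {α : Type} (p : α → Bool) :
    ∀ (l : List α) (y : α) (ys : List α), l.dropWhile p = y :: ys → p y = false := by
  intro l
  induction l with
  | nil => intro y ys h; simp at h
  | cons a t ih =>
    intro y ys h
    by_cases ha : p a
    · rw [List.dropWhile_cons_of_pos ha] at h; exact ih y ys h
    · rw [List.dropWhile_cons_of_neg ha] at h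
      cases h
      simpa using ha

theorem gruns_ones : ∀ (t : List Int), (∀ y ∈ t, y == 1) →
    ∀ (r : List Int) (c : Int), gruns c (t ++ r) = gruns (c + (t.length : Int)) r := by
  intro t
  induction t with
  | nil => intro _ r c; simp
  | cons y t ih =>
    intro h r c
    have hy : (y == (1 : Int)) = true := h y (by simp)
    simp only [List.cons_append, gruns, hy, if_pos]
    rw [ih (fun z hz => h z (by simp [hz])) r (c + 1)]
    congr 1
    push_cast [List.length_cons]
    ring

theorem gruns_zeros : ∀ (t : List Int), (∀ y ∈ t, (y == (1 : Int)) = false) →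
    ∀ (r : List Int), gruns 0 (t ++ r) = gruns 0 r := by
  intro t
  induction t with
  | nil => intro _ r; simp
  | cons y t ih =>
    intro h r
    have hy : (y == (1 : Int)) = false := h y (by simp)
    simp only [List.cons_append, gruns, hy]
    simpa using ih (fun z hz => h z (by simp [hz])) r

theorem gruns_flush (c : Int) (hc : c ≠ 0) :
    ∀ (r : List Int), (∀ y ys, r = y :: ys → (y == (1 : Int)) = false) →
    gruns c r = c :: gruns 0 r := by
  intro r
  match r with
  | [] => intro _; simp [gruns, hc]
  | y :: ys =>
    intro h
    have hy := h y ys rfl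
    simp [gruns, hy, hc]

theorem gruns_runsB : ∀ (n : Nat) (l : List Int), l.length ≤ n → gruns 0 l = runsB l := by
  intro n
  induction n with
  | zero =>
    intro l h
    have : l = [] := List.eq_nil_of_length_eq_zero (Nat.le_zero.mp h)
    subst this
    simp [gruns, runsB]
  | succ n ih =>
    intro l h
    match l with
    | [] => simp [gruns, runsB]
    | x :: t =>
      have hpx : (fun y : Int => (y == 1) == (x == 1)) x = true := by simp
      have hdrop : (x :: t).dropWhile (fun y : Int => (y == 1) == (x == 1))
          = t.dropWhile (fun y : Int => (y == 1) == (x == 1)) :=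
        List.dropWhile_cons_of_pos hpx
      have hlen : (t.dropWhile (fun y : Int => (y == 1) == (x == 1))).length ≤ n := by
        have := List.length_dropWhile_le (fun y : Int => (y == 1) == (x == 1)) t
        have ht : t.length ≤ n := by simpa using Nat.le_of_succ_le_succ h
        omega
      have hsplit := (List.takeWhile_append_dropWhile
        (p := fun y : Int => (y == 1) == (x == 1)) (l := x :: t)).symm
      by_cases hx : x == 1
      · have hones : ∀ y ∈ (x :: t).takeWhile (fun y : Int => (y == 1) == (x == 1)), y == 1 := by
          intro y hy
          have := List.mem_takeWhile_imp hy
          simpa [hx] using this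
        have htne : ((x :: t).takeWhile (fun y : Int => (y == 1) == (x == 1))).length ≠ 0 := by
          simp
        have hheads : ∀ y ys,
            (x :: t).dropWhile (fun y : Int => (y == 1) == (x == 1)) = y :: ys →
            (y == (1 : Int)) = false := by
          intro y ys hy
          have := dropWhile_head_false _ _ _ _ hy
          simpa [hx] using this
        calc gruns 0 (x :: t)
            = gruns 0 ((x :: t).takeWhile (fun y : Int => (y == 1) == (x == 1))
                ++ (x :: t).dropWhile (fun y : Int => (y == 1) == (x == 1))) := by rw [← hsplit]
          _ = gruns (0 + (((x :: t).takeWhile (fun y : Int => (y == 1) == (x == 1))).length : Int))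
                ((x :: t).dropWhile (fun y : Int => (y == 1) == (x == 1))) :=
              gruns_ones _ hones _ _
          _ = ((((x :: t).takeWhile (fun y : Int => (y == 1) == (x == 1))).length : Int))
                :: gruns 0 ((x :: t).dropWhile (fun y : Int => (y == 1) == (x == 1))) := by
              rw [zero_add]
              exact gruns_flush _ (by exact_mod_cast htne) _ hheads
          _ = runsB (x :: t) := by
              rw [hdrop, ih _ hlen]
              simp [runsB, hx]
      · have hzeros : ∀ y ∈ (x :: t).takeWhile (fun y : Int => (y == 1) == (x == 1)),
            (y == (1 : Int)) = false := by
          intro y hy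
          have := List.mem_takeWhile_imp hy
          simpa [hx] using this
        calc gruns 0 (x :: t)
            = gruns 0 ((x :: t).takeWhile (fun y : Int => (y == 1) == (x == 1))
                ++ (x :: t).dropWhile (fun y : Int => (y == 1) == (x == 1))) := by rw [← hsplit]
          _ = gruns 0 ((x :: t).dropWhile (fun y : Int => (y == 1) == (x == 1))) :=
              gruns_zeros _ hzeros _
          _ = runsB (x :: t) := by
              rw [hdrop, ih _ hlen]
              simp [runsB, hx]

theorem check_row_fill_eq (size : Int) (rc row : List Int) :
    check_row_fill size rc row = check_line_alt size rc row := by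
  simp only [check_row_fill, check_line_alt]
  rw [show (fun (s : List Int × Int) (i : Int) =>
        if PySem.List.pyGetD row i 0 == 1 then (s.1, s.2 + 1)
        else if s.2 ≠ 0 then (s.1 ++ [s.2], (0 : Int)) else s)
      = (fun s i => stepElem s (PySem.List.pyGetD row i 0)) from rfl]
  rw [fold_gruns (PySem.List.pyRange 0 size 1) (fun i => PySem.List.pyGetD row i 0) [] 0]
  rw [List.nil_append,
    gruns_runsB ((PySem.List.pyRange 0 size 1).map (fun i => PySem.List.pyGetD row i 0)).length _ le_rfl]
  rfl

theorem check_column_fill_eq (size : Int) (cc col : List Int) :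
    check_column_fill size cc col = check_line_alt size cc col := by
  simp only [check_column_fill, check_line_alt]
  rw [show (fun (s : List Int × Int) (i : Int) =>
        if PySem.List.pyGetD col i 0 == 1 then (s.1, s.2 + 1)
        else if s.2 ≠ 0 then (s.1 ++ [s.2], (0 : Int)) else s)
      = (fun s i => stepElem s (PySem.List.pyGetD col i 0)) from rfl]
  rw [fold_gruns (PySem.List.pyRange 0 size 1) (fun i => PySem.List.pyGetD col i 0) [] 0]
  rw [List.nil_append,
    gruns_runsB ((PySem.List.pyRange 0 size 1).map (fun i => PySem.List.pyGetD col i 0)).length _ le_rfl]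
  rfl

-- ===== VERDICT (by name: the statement is the Claim_ definition above) =====
theorem check_map_fill_spec : Claim_equal_check_map_fill := by
  intro size rcs ccs m _ _
  unfold Spec_check_map_fill check_map_fill check_map_fill_alt
  simp only [check_row_fill_eq, check_column_fill_eq]
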